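-- pv_equiv track=rewrite | github.com/ruchita-gokani/basic_probs | no_idea.py | no_idea
-- ===== SOURCE A (Python) =====
-- def no_idea(ar, a, b):
--     h = 0
--     for i in range(len(ar)):
--         if ar[i] in a:
--             h+=1
--         if ar[i] in b:
--             h-=1
--     return h
-- ===== SOURCE B (Python) =====
-- def no_idea(ar, a, b):
--     # Inverted, indexed approach: build a frequency dict of ar once, then
--     # iterate over the DISTINCT needle values of a (then b) and add/subtract
--     # each value's occurrence count -- no repeated scans of ar or of a/b (indexed, needle-driven traversal).
--     c = {}
--     for x in ar:
--         c[x] = c.get(x, 0) + 1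
--     h = 0
--     for v in dict.fromkeys(a):
--         h += c.get(v, 0)
--     for v in dict.fromkeys(b):
--         h -= c.get(v, 0)
--     return h
-- ===== Notes on version B (the rewrite author's own statement) =====
-- stated objective: alternative
-- what changed: Instead of scanning ar and testing each element's membership in a and b, B builds a frequency dictionary of ar once and then iterates over the deduplicated values of a and of b, adding/subtracting each value's stored occurrence count.
import Mathlib
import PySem

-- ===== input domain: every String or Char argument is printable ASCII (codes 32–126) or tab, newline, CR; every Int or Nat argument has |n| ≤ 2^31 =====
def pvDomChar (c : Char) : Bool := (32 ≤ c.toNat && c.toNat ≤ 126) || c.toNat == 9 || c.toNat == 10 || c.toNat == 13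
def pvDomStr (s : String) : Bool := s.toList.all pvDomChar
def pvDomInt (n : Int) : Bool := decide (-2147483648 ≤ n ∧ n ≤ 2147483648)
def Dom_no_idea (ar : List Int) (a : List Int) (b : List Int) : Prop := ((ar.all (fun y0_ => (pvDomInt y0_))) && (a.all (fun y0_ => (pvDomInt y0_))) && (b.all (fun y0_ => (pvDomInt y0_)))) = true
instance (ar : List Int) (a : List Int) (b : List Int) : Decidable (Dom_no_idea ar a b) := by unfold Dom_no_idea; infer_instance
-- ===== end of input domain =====

-- B builds a frequency dict of ar once, then loops over the deduplicated values of a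
-- (then b) adding/subtracting each value's stored count -- a different, indexed
-- algorithm replacing A's per-element membership scans (alternative decomposition).
-- ===== PORT A =====
def no_idea (ar : List Int) (a : List Int) (b : List Int) : Int :=
  (PySem.List.pyRange 0 ar.length 1).foldl
    (fun h i =>
      let x := PySem.List.pyGetD ar i 0   -- i is always in range, so pyGetD = ar[i]
      let h := if a.contains x then h + 1 else h
      if b.contains x then h - 1 else h) 0

-- ===== PORT B =====
-- c = {}; for x in ar: c[x] = c.get(x,0)+1;
-- for v in dict.fromkeys(a): h += c.get(v,0); for v in dict.fromkeys(b): h -= c.get(v,0)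
def no_idea_alt (ar : List Int) (a : List Int) (b : List Int) : Int :=
  let c := ar.foldl (fun d x => d.insert x (d.getD x 0 + 1)) (PySem.Dict.empty : PySem.Dict Int Int)
  (PySem.List.dedup b).foldl (fun h v => h - c.getD v 0)
    ((PySem.List.dedup a).foldl (fun h v => h + c.getD v 0) 0)

-- ===== PRECONDITION & SPEC =====
def Spec_no_idea (ar : List Int) (a : List Int) (b : List Int) (out : Int) : Prop := out = no_idea_alt ar a b
instance (ar : List Int) (a : List Int) (b : List Int) (out : Int) : Decidable (Spec_no_idea ar a b out) := by unfold Spec_no_idea; infer_instance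

-- ===== CLAIM =====
def Claim_equal_no_idea : Prop := ∀ (ar : List Int) (a : List Int) (b : List Int), Dom_no_idea ar a b → Spec_no_idea ar a b (no_idea ar a b)

-- ===== LEMMAS AND PROOFS =====

-- A's loop over ar computes (count in a) - (count in b).
lemma no_idea_loop (a b : List Int) : ∀ (ar : List Int) (h : Int),
    ar.foldl (fun h x =>
      let h := if a.contains x then h + 1 else h
      if b.contains x then h - 1 else h) h
    = h + ((ar.countP (fun x => a.contains x)) : Int) - ((ar.countP (fun x => b.contains x)) : Int) := by
  intro ar
  induction ar with
  | nil => intro h; simp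
  | cons y t ih =>
    intro h
    rw [List.foldl_cons, ih]
    simp only [List.countP_cons]
    split_ifs <;> push_cast <;> ring

-- Summing the 0/1 indicator of x over a duplicate-free list l is membership.
lemma sum_indicator (x : Int) : ∀ (l : List Int), l.Nodup →
    (l.map (fun v => ((if x = v then 1 else 0) : Int))).sum
      = if l.contains x then 1 else 0 := by
  intro l
  induction l with
  | nil => intro _; simp
  | cons w s ih =>
    intro hnd
    obtain ⟨hw, hs⟩ := List.nodup_cons.mp hnd
    rw [List.map_cons, List.sum_cons, ih hs]
    by_cases hxw : x = w
    · subst hxw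
      have hns : ¬ s.contains x := by simpa using hw
      simp [hw]
    · simp [hxw]

-- For a duplicate-free needle list l, summing ar.count over l equals counting
-- the elements of ar that belong to l.
lemma sum_count_eq_countP (l : List Int) (hl : l.Nodup) : ∀ (ar : List Int),
    (l.map (fun v => (ar.count v : Int))).sum = ((ar.countP (fun x => l.contains x)) : Int) := by
  intro ar
  induction ar with
  | nil => simp
  | cons x t ih =>
    have hsplit : (l.map (fun v => (((x :: t).count v : Nat) : Int))).sum
        = (l.map (fun v => ((t.count v : Nat) : Int))).sum
          + (l.map (fun v => ((if x = v then 1 else 0) : Int))).sum := by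
      rw [← List.sum_map_add]
      congr 1
      refine List.map_congr_left ?_
      intro v _
      simp only [List.count_cons]
      by_cases h : x = v
      · simp [h]
      · simp [h]
    rw [hsplit, ih, sum_indicator x l hl, List.countP_cons]
    by_cases h : l.contains x
    · simp
    · simp

-- B's two fold loops, expressed through countP.
lemma alt_eq_countP (ar a b : List Int) :
    no_idea_alt ar a b
      = ((ar.countP (fun x => a.contains x)) : Int) - ((ar.countP (fun x => b.contains x)) : Int) := by
  unfold no_idea_alt
  have hc : ∀ v : Int,
      PySem.Dict.getD (ar.foldl (fun d x => d.insert x (d.getD x 0 + 1))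
        (PySem.Dict.empty : PySem.Dict Int Int)) v 0 = (ar.count v : Int) := by
    intro v
    rw [PySem.Dict.getD_foldl_insert_add_one]
    simp
  simp only [hc]
  have hadd : ∀ (l : List Int) (h : Int),
      l.foldl (fun h v => h + (ar.count v : Int)) h
        = h + (l.map (fun v => (ar.count v : Int))).sum := by
    intro l
    induction l with
    | nil => intro h; simp
    | cons w s ihs => intro h; rw [List.foldl_cons, ihs]; simp; ring
  have hsub : ∀ (l : List Int) (h : Int),
      l.foldl (fun h v => h - (ar.count v : Int)) h
        = h - (l.map (fun v => (ar.count v : Int))).sum := by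
    intro l
    induction l with
    | nil => intro h; simp
    | cons w s ihs => intro h; rw [List.foldl_cons, ihs]; simp; ring
  rw [hsub, hadd]
  rw [sum_count_eq_countP (PySem.List.dedup a) (PySem.List.nodup_dedup a) ar,
      sum_count_eq_countP (PySem.List.dedup b) (PySem.List.nodup_dedup b) ar]
  have hca : (fun x => (PySem.List.dedup a).contains x) = (fun x => a.contains x) := by
    funext x; simp
  have hcb : (fun x => (PySem.List.dedup b).contains x) = (fun x => b.contains x) := by
    funext x; simp
  rw [hca, hcb]
  ring

theorem no_idea_spec : Claim_equal_no_idea := by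
  intro ar a b _
  unfold Spec_no_idea no_idea
  rw [PySem.List.foldl_pyRange_zero_pyGetD' ar 0
      (fun h x =>
        let h := if a.contains x then h + 1 else h
        if b.contains x then h - 1 else h) 0]
  rw [no_idea_loop, alt_eq_countP]
  ring
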